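-- pv_equiv track=rewrite | github.com/dopplercycles/CAM | tools/doppler/market_monitor.py | _build_scan_queries
-- ===== SOURCE A (Python) =====
-- def _build_scan_queries(source: str) -> list[str]:
--     """Build search queries for competitor discovery."""
--     queries = []
--     base_terms = [
--         "motorcycle mechanic",
--         "mobile motorcycle repair",
--         "motorcycle diagnostics",
--         "motorcycle service",
--     ]
--
--     if source == "craigslist":
--         for term in base_terms:
--             queries.append(f"site:craigslist.org {term} Portland OR Gresham")
--     elif source == "yelp":
--         for term in base_terms[:2]:  # Fewer queries for Yelp
--             queries.append(f"site:yelp.com {term} Portland Oregon")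
--     else:  # google / general
--         for term in base_terms:
--             queries.append(f"{term} Portland OR Gresham Oregon")
--
--     return queries
-- ===== SOURCE B (Python) =====
-- # Precomputed result table: the finished query lists are constants; the function
-- # is a single dict lookup with a default, copied so each call returns a fresh list.
-- _QUERY_TABLE = {
--     "craigslist": [
--         "site:craigslist.org motorcycle mechanic Portland OR Gresham",
--         "site:craigslist.org mobile motorcycle repair Portland OR Gresham",
--         "site:craigslist.org motorcycle diagnostics Portland OR Gresham",
--         "site:craigslist.org motorcycle service Portland OR Gresham",
--     ],
--     "yelp": [
--         "site:yelp.com motorcycle mechanic Portland Oregon",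
--         "site:yelp.com mobile motorcycle repair Portland Oregon",
--     ],
-- }
--
-- _DEFAULT_QUERIES = [
--     "motorcycle mechanic Portland OR Gresham Oregon",
--     "mobile motorcycle repair Portland OR Gresham Oregon",
--     "motorcycle diagnostics Portland OR Gresham Oregon",
--     "motorcycle service Portland OR Gresham Oregon",
-- ]
--
-- def _build_scan_queries(source: str) -> list[str]:
--     """Build search queries for competitor discovery."""
--     return list(_QUERY_TABLE.get(source, _DEFAULT_QUERIES))
-- ===== Notes on version B (the rewrite author's own statement) =====
-- stated objective: simpler
-- what changed: Replaces runtime string formatting in three branch-specific append loops by a precomputed constant table of the finished query lists, so the function is a single lookup with a default and builds no strings at call time.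
import Mathlib
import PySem

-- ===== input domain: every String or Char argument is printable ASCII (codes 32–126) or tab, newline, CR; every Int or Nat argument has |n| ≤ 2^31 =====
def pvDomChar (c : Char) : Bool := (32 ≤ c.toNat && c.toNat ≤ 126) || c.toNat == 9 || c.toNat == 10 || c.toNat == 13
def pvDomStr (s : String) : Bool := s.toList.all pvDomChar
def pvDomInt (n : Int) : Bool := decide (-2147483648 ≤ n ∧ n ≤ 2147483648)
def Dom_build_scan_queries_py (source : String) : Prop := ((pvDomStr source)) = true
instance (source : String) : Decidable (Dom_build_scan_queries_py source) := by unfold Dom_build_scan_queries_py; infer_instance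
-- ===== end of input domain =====

-- B replaces A's three branch-specific append loops (which format each query at call time)
-- by a precomputed constant table of finished query lists and one lookup; objective: simpler.

-- ===== PORT A =====
-- literal transliteration: three branches, each folding an append over its term list
def build_scan_queries_py (source : String) : List String :=
  let base_terms : List String :=
    ["motorcycle mechanic", "mobile motorcycle repair",
     "motorcycle diagnostics", "motorcycle service"]
  if source = "craigslist" then
    base_terms.foldl (fun queries term =>
      queries ++ ["site:craigslist.org " ++ term ++ " Portland OR Gresham"]) []
  else if source = "yelp" then
    (PySem.List.slice base_terms none (some 2)).foldl (fun queries term =>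
      queries ++ ["site:yelp.com " ++ term ++ " Portland Oregon"]) []
  else
    base_terms.foldl (fun queries term =>
      queries ++ [term ++ " Portland OR Gresham Oregon"]) []

-- ===== PORT B =====
-- module-level constants of Source B
def pvQueryTable : PySem.Dict String (List String) :=
  PySem.Dict.ofList
    [("craigslist",
      ["site:craigslist.org motorcycle mechanic Portland OR Gresham",
       "site:craigslist.org mobile motorcycle repair Portland OR Gresham",
       "site:craigslist.org motorcycle diagnostics Portland OR Gresham",
       "site:craigslist.org motorcycle service Portland OR Gresham"]),
     ("yelp",
      ["site:yelp.com motorcycle mechanic Portland Oregon",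
       "site:yelp.com mobile motorcycle repair Portland Oregon"])]

def pvDefaultQueries : List String :=
  ["motorcycle mechanic Portland OR Gresham Oregon",
   "mobile motorcycle repair Portland OR Gresham Oregon",
   "motorcycle diagnostics Portland OR Gresham Oregon",
   "motorcycle service Portland OR Gresham Oregon"]

-- single lookup with default (list() copy is identity on immutable Lean lists)
def build_scan_queries_py_alt (source : String) : List String :=
  PySem.Dict.getD pvQueryTable source pvDefaultQueries

-- ===== PRECONDITION & SPEC =====
def Spec_build_scan_queries_py (source : String) (out : List String) : Prop := out = build_scan_queries_py_alt source
instance (source : String) (out : List String) : Decidable (Spec_build_scan_queries_py source out) := by unfold Spec_build_scan_queries_py; infer_instance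

-- ===== CLAIM =====
def Claim_equal_build_scan_queries_py : Prop := ∀ (source : String), Dom_build_scan_queries_py source → Spec_build_scan_queries_py source (build_scan_queries_py source)

-- ===== LEMMAS AND PROOFS =====

-- ===== VERDICT =====
theorem build_scan_queries_py_spec : Claim_equal_build_scan_queries_py := by
  intro source _
  unfold Spec_build_scan_queries_py build_scan_queries_py build_scan_queries_py_alt
  by_cases h1 : source = "craigslist"
  · subst h1; rfl
  · by_cases h2 : source = "yelp"
    · subst h2; rfl
    · simp [pvQueryTable, pvDefaultQueries, PySem.Dict.ofList,
            PySem.Dict.update, PySem.Dict.getD_insert, h1, h2,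
            PySem.Dict.getD_empty]
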